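-- pv_equiv track=rewrite | github.com/papasven/rs41_raw_data_reader | raw.py | bit_flags
-- ===== SOURCE A (Python) =====
-- def bit_flags(b):
--     ba = {}
--     bf=[b[i//8] & 1 << i%8 != 0 for i in range(len(b) * 8)]
--     ba["mode"] = 'Flight mode' if bf[0] == True else 'Start phase'
--     ba["cent"] = 'Descent' if bf[1] == True else 'Ascent'
--     ba["check"] = 'self-check' if bf[5] == True else None
--     ba["VBATmin"] = 'VBATmin check enabled' if bf[11] == True else 'VBATmin check disabled'
--     ba["VBAT"] = 'low' if bf[12] == True else 'ok'
--     return ba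
-- ===== SOURCE B (Python) =====
-- def bit_flags(b):
--     b0, b1 = b[0], b[1]
--     return {
--         "mode": 'Flight mode' if b0 & 0x01 else 'Start phase',
--         "cent": 'Descent' if b0 & 0x02 else 'Ascent',
--         "check": 'self-check' if b0 & 0x20 else None,
--         "VBATmin": 'VBATmin check enabled' if b1 & 0x08 else 'VBATmin check disabled',
--         "VBAT": 'low' if b1 & 0x10 else 'ok',
--     }
-- ===== Notes on version B (the rewrite author's own statement) =====
-- stated objective: faster
-- what changed: B reads the five relevant bits of b[0] and b[1] directly with constant-time masks instead of materialising the full list of len(b)*8 bit flags.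
import Mathlib
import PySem

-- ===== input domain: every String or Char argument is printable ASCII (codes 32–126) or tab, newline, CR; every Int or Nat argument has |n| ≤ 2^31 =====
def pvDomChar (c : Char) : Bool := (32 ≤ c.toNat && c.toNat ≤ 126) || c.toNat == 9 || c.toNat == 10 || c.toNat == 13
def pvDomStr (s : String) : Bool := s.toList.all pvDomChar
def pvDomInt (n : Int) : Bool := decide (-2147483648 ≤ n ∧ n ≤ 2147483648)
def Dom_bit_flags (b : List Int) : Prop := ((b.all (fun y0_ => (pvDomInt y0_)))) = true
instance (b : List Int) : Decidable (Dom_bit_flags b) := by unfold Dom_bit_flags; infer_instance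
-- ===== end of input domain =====

-- ===== PORT A =====
-- 'b[i//8] & 1 << i%8' is exact here: i ranges over range(len(b)*8), so i//8 is always
-- in range and the pyGetD default 0 is never taken; i%8 >= 0 so .toNat is exact.
def bit_flags (b : List Int) : List (String × Option String) :=
  let bf : List Bool :=
    (PySem.List.pyRange 0 (PySem.List.len b * 8) 1).map
      (fun i => decide (PySem.Int.band (PySem.List.pyGetD b (PySem.Int.floordiv i 8) 0)
                          ((1 : Int) <<< (PySem.Int.mod i 8).toNat) ≠ 0))
  -- bf[0], bf[1], bf[5], bf[11], bf[12]: in range under Pre_ (len b >= 2), the defaults are never taken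
  let ba : PySem.Dict String (Option String) := PySem.Dict.empty
  let ba := ba.insert "mode" (some (if PySem.List.pyGetD bf 0 false = true then "Flight mode" else "Start phase"))
  let ba := ba.insert "cent" (some (if PySem.List.pyGetD bf 1 false = true then "Descent" else "Ascent"))
  let ba := ba.insert "check" (if PySem.List.pyGetD bf 5 false = true then some "self-check" else none)
  let ba := ba.insert "VBATmin" (some (if PySem.List.pyGetD bf 11 false = true then "VBATmin check enabled" else "VBATmin check disabled"))
  let ba := ba.insert "VBAT" (some (if PySem.List.pyGetD bf 12 false = true then "low" else "ok"))
  ba.items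

-- ===== PORT B =====
-- B reads the five relevant bits of b[0] and b[1] directly; faster: O(1) vs A's O(n) bit list.
def bit_flags_alt (b : List Int) : List (String × Option String) :=
  let b0 := PySem.List.pyGetD b 0 0   -- in range under Pre_
  let b1 := PySem.List.pyGetD b 1 0
  [("mode", some (if PySem.Int.band b0 1 ≠ 0 then "Flight mode" else "Start phase")),
   ("cent", some (if PySem.Int.band b0 2 ≠ 0 then "Descent" else "Ascent")),
   ("check", if PySem.Int.band b0 32 ≠ 0 then some "self-check" else none),
   ("VBATmin", some (if PySem.Int.band b1 8 ≠ 0 then "VBATmin check enabled" else "VBATmin check disabled")),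
   ("VBAT", some (if PySem.Int.band b1 16 ≠ 0 then "low" else "ok"))]

-- ===== PRECONDITION & SPEC =====
-- A indexes bf[12] (= bit 4 of b[1]), so both programs raise IndexError when len(b) < 2.
def Pre_bit_flags (b : List Int) : Prop := 2 ≤ b.length
instance (b : List Int) : Decidable (Pre_bit_flags b) := by unfold Pre_bit_flags; infer_instance
def pvWitness_bit_flags : List Int := [33, 24]
def Spec_bit_flags (b : List Int) (out : List (String × Option String)) : Prop := out = bit_flags_alt b
instance (b : List Int) (out : List (String × Option String)) : Decidable (Spec_bit_flags b out) := by unfold Spec_bit_flags; infer_instance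

-- ===== CLAIM (what is proved, stated in full; the proofs are below) =====
def Claim_equal_bit_flags : Prop := ∀ (b : List Int), Dom_bit_flags b → Pre_bit_flags b → Spec_bit_flags b (bit_flags b)

-- ===== LEMMAS AND PROOFS =====

-- ===== VERDICT (by name: the statement is the Claim_ definition above) =====
theorem bit_flags_spec : Claim_equal_bit_flags := by
  intro b _ hpre
  unfold Spec_bit_flags
  obtain ⟨b0, b1, rest, rfl⟩ : ∃ b0 b1 rest, b = b0 :: b1 :: rest := by
    match b, hpre with
    | b0 :: b1 :: rest, _ => exact ⟨b0, b1, rest, rfl⟩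
  have hlen : (12 : Int) < PySem.List.len (b0 :: b1 :: rest) * 8 := by
    simp [PySem.List.len_eq]; omega
  unfold bit_flags bit_flags_alt
  dsimp only
  rw [PySem.List.pyGetD_map_pyRange_of_nonneg _ _ 0 _ (by omega) (by omega),
      PySem.List.pyGetD_map_pyRange_of_nonneg _ _ 1 _ (by omega) (by omega),
      PySem.List.pyGetD_map_pyRange_of_nonneg _ _ 5 _ (by omega) (by omega),
      PySem.List.pyGetD_map_pyRange_of_nonneg _ _ 11 _ (by omega) (by omega),
      PySem.List.pyGetD_map_pyRange_of_nonneg _ _ 12 _ (by omega) (by omega)]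
  have f0 : PySem.Int.floordiv 0 8 = 0 := by decide
  have f1 : PySem.Int.floordiv 1 8 = 0 := by decide
  have f5 : PySem.Int.floordiv 5 8 = 0 := by decide
  have f11 : PySem.Int.floordiv 11 8 = 1 := by decide
  have f12 : PySem.Int.floordiv 12 8 = 1 := by decide
  have m0 : ((1:Int) <<< (PySem.Int.mod 0 8).toNat) = 1 := by decide
  have m1 : ((1:Int) <<< (PySem.Int.mod 1 8).toNat) = 2 := by decide
  have m5 : ((1:Int) <<< (PySem.Int.mod 5 8).toNat) = 32 := by decide
  have m11 : ((1:Int) <<< (PySem.Int.mod 11 8).toNat) = 8 := by decide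
  have m12 : ((1:Int) <<< (PySem.Int.mod 12 8).toNat) = 16 := by decide
  have g0 : PySem.List.pyGetD (b0 :: b1 :: rest) 0 0 = b0 :=
    PySem.List.pyGetD_zero_cons b0 (b1 :: rest) 0
  have g1 : PySem.List.pyGetD (b0 :: b1 :: rest) 1 0 = b1 := by
    rw [show (1:Int) = ((1:Nat):Int) from rfl, PySem.List.pyGetD_natCast]; rfl
  rw [f0, f1, f5, f11, f12, m0, m1, m5, m11, m12, g0, g1]
  simp [PySem.Dict.insert, PySem.Dict.empty]
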